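-- pv_equiv track=rewrite | github.com/posl/comment_recommendation | script/mod_gen/1_time/zh/132_A/5.py | isTwoCharacter
-- ===== SOURCE A (Python) =====
-- def isTwoCharacter(s):
--     if len(s) != 4:
--         return False
--     if len(set(s)) == 2:
--         for c in set(s):
--             if s.count(c) != 2:
--                 return False
--         return True
--     else:
--         return False
-- ===== SOURCE B (Python) =====
-- def isTwoCharacter(s):
--     if len(s) != 4:
--         return False
--     a, b, c, d = sorted(s)
--     return a == b and c == d and b != c
-- ===== Notes on version B (the rewrite author's own statement) =====
-- stated objective: alternative
-- what changed: Replaces A's set-build plus per-distinct-character repeated s.count scans by sorting the four characters and checking the sorted pattern xxyy (first pair equal, last pair equal, middle pair different).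
import Mathlib
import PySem

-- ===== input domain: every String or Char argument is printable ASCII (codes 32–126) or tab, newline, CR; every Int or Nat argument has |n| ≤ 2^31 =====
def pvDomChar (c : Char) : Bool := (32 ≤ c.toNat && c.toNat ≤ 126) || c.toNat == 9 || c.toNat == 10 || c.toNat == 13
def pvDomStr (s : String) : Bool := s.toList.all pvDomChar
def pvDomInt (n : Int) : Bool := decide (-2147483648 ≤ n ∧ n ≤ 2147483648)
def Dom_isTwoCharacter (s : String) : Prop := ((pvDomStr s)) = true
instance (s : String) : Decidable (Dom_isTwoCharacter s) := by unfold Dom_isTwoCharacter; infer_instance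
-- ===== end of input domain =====

-- B replaces A's set-build plus per-distinct-character repeated count scans by sorting the four
-- characters and checking the sorted pattern xxyy (alternative decomposition, not claimed faster).


-- ===== PORT A =====
-- 'for c in set(s): if s.count(c) != 2: return False / return True' — the loop's outcome does not
-- depend on set iteration order, so it is the order-independent 'all' over the set's elements.
-- s.count(c) with a single character c is List.count c on s.toList (exact for a length-1 needle).
def isTwoCharacter (s : String) : Bool :=
  if PySem.Str.len s ≠ 4 then false
  else if (PySem.Set.ofList s.toList).length = 2 then
    (PySem.Set.ofList s.toList).all (fun c => s.toList.count c == 2)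
  else false

-- ===== PORT B =====
-- a, b, c, d = sorted(s)  (the guard guarantees exactly 4 characters, so the unpacking succeeds;
-- the catch-all match arm is unreachable); then a == b and c == d and b != c.
def isTwoCharacter_alt (s : String) : Bool :=
  if PySem.Str.len s ≠ 4 then false
  else
    match PySem.List.sorted s.toList (fun c => c) false with
    | [a, b, c, d] => a == b && c == d && b != c
    | _ => false

-- ===== PRECONDITION & SPEC =====
def Spec_isTwoCharacter (s : String) (out : Bool) : Prop := out = isTwoCharacter_alt s
instance (s : String) (out : Bool) : Decidable (Spec_isTwoCharacter s out) := by unfold Spec_isTwoCharacter; infer_instance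

-- ===== CLAIM (what is proved, stated in full; the proofs are below) =====
def Claim_equal_isTwoCharacter : Prop := ∀ (s : String), Dom_isTwoCharacter s → Spec_isTwoCharacter s (isTwoCharacter s)

-- ===== LEMMAS AND PROOFS =====

-- A's whole test, evaluated on the sorted list [a,b,c,d], is B's pattern check.
theorem key_sorted_case (a b c d : Char) (hab : a ≤ b) (hbc : b ≤ c) (hcd : c ≤ d) :
    (if (PySem.Set.ofList [a,b,c,d]).length = 2 then
       (PySem.Set.ofList [a,b,c,d]).all (fun x => ([a,b,c,d] : List Char).count x == 2)
     else false)
    = (a == b && c == d && b != c) := by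
  by_cases h1 : a = b <;> by_cases h2 : b = c <;> by_cases h3 : c = d
  · simp [PySem.Set.ofList, PySem.Set.add, List.contains_eq_mem, h1, h2, h3]
  · simp [PySem.Set.ofList, PySem.Set.add, List.contains_eq_mem, h1, h2, h3, Ne.symm h3,
          List.count_cons]
  · have hbd : b ≠ d := ne_of_lt (lt_of_lt_of_le (lt_of_le_of_ne hbc h2) hcd)
    simp [PySem.Set.ofList, PySem.Set.add, List.contains_eq_mem, h1, h3,
          hbd, Ne.symm hbd, List.count_cons]
  · have hbd : b ≠ d := ne_of_lt (lt_of_lt_of_le (lt_of_le_of_ne hbc h2) hcd)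
    simp [PySem.Set.ofList, PySem.Set.add, List.contains_eq_mem, h1, h2, Ne.symm h2, h3,
          Ne.symm h3, Ne.symm hbd]
  · have had : a ≠ d := ne_of_lt (lt_of_lt_of_le (lt_of_le_of_ne hab h1) (hbc.trans hcd))
    simp [PySem.Set.ofList, PySem.Set.add, List.contains_eq_mem, h2, h3,
          had, Ne.symm had, List.count_cons]
  · have hac : a ≠ c := h2 ▸ h1
    have had : a ≠ d := ne_of_lt (lt_of_lt_of_le (lt_of_le_of_ne hab h1) (hbc.trans hcd))
    simp [PySem.Set.ofList, PySem.Set.add, List.contains_eq_mem, h2, Ne.symm h3,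
          Ne.symm hac, Ne.symm had]
  · have hbd : b ≠ d := h3 ▸ h2
    have had : a ≠ d := ne_of_lt (lt_of_lt_of_le (lt_of_le_of_ne hab h1) (hbc.trans hcd))
    simp [PySem.Set.ofList, PySem.Set.add, List.contains_eq_mem, h1, Ne.symm h1, h3,
          hbd, Ne.symm hbd, Ne.symm had]
  · have hac : a ≠ c := ne_of_lt (lt_of_lt_of_le (lt_of_le_of_ne hab h1) hbc)
    have hbd : b ≠ d := ne_of_lt (lt_of_lt_of_le (lt_of_le_of_ne hbc h2) hcd)
    have had : a ≠ d := ne_of_lt (lt_of_lt_of_le (lt_of_le_of_ne hab h1) (hbc.trans hcd))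
    simp [PySem.Set.ofList, PySem.Set.add, List.contains_eq_mem, h1, Ne.symm h1, h2, Ne.symm h2,
          h3, Ne.symm h3, Ne.symm hac, Ne.symm hbd, Ne.symm had]

-- A's test is invariant under rearranging the string's characters.
theorem A_body_perm_invariant (l m : List Char) (hp : l.Perm m) :
    (if (PySem.Set.ofList l).length = 2 then
       (PySem.Set.ofList l).all (fun x => l.count x == 2) else false)
    = (if (PySem.Set.ofList m).length = 2 then
       (PySem.Set.ofList m).all (fun x => m.count x == 2) else false) := by
  have hS : (PySem.Set.ofList l).Perm (PySem.Set.ofList m) :=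
    (List.perm_ext_iff_of_nodup (PySem.Set.nodup_ofList l) (PySem.Set.nodup_ofList m)).mpr
      (by simp [PySem.Set.mem_ofList, hp.mem_iff])
  have hf : (fun x : Char => l.count x == 2) = (fun x => m.count x == 2) := by
    funext x; rw [hp.count_eq]
  rw [hS.length_eq, hf, hS.all_eq]

-- ===== VERDICT (by name: the statement is the Claim_ definition above) =====
theorem isTwoCharacter_spec : Claim_equal_isTwoCharacter := by
  intro s _
  unfold Spec_isTwoCharacter isTwoCharacter isTwoCharacter_alt
  by_cases hl : PySem.Str.len s ≠ 4
  · rw [if_pos hl, if_pos hl]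
  · rw [if_neg hl, if_neg hl]
    have hlen : s.toList.length = 4 := by
      simp [PySem.Str.len_eq] at hl; exact_mod_cast hl
    have hts : (PySem.List.sorted s.toList (fun c => c) false).length = 4 := by
      rw [PySem.List.length_sorted]; exact hlen
    obtain ⟨a, b, c, d, ht⟩ := List.length_eq_four.mp hts
    have hperm : s.toList.Perm [a, b, c, d] :=
      (ht ▸ PySem.List.sorted_perm s.toList (fun c => c) false).symm
    have hpw := PySem.List.sorted_pairwise s.toList (fun c => c)
    rw [ht] at hpw
    simp only [List.pairwise_cons, List.mem_cons] at hpw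
    rw [ht]
    rw [A_body_perm_invariant s.toList [a, b, c, d] hperm]
    exact key_sorted_case a b c d (hpw.1 b (by simp)) (hpw.2.1 c (by simp)) (hpw.2.2.1 d (by simp))
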